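-- pv_equiv track=rewrite | github.com/kangwonlee/nmisp | 00_introduction/digit_table.py | unsigned_sigined_int
-- ===== SOURCE A (Python) =====
-- def unsigned_sigined_int(n):
--
--     # start the list for rows of table with header rows
--     table = [ f''' {n} bit bit pattern | `unsigned int{n}_t` | `signed int{n}_t`
--     :-----------------:|:--------:|:------:''']
--
--     # table body : 0 ~ 3
--     for i in range(0, 3):
--         table.append(f'{i:0{n}b} | {i} | {i}')
--
--     # to make the table shorter add ellipsis
--     table.append(f' ... | ... | ... ')
--
--     # rows around the change of the sign
--     # positive
--     for i in range(2**(n-1)-2, 2**(n-1)-1+1):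
--         table.append(f'{i:0{n}b} | {i} | {i}')
--
--     # negative
--     for i in range(2**(n-1), 2**(n-1)+2+1):
--         table.append(f'{i:0{n}b} | {i} | {i-(2**n)}')
--
--     # to make the table shorter add ellipsis
--     table.append(f' ... | ... | ... ')
--
--     # rows close to the n bit limit
--     for i in range((2**n)-2, (2**n)-1+1):
--         table.append(f'{i:0{n}b} | {i} | {i-(2**n)}')
--
--     return table
-- ===== SOURCE B (Python) =====
-- def unsigned_sigined_int(n):
--     # columnar construction: build the three columns separately (signed column by the
--     # uniform two's-complement threshold rule), then zip them into rows
--     header = (f' {n} bit bit pattern | `unsigned int{n}_t` | `signed int{n}_t` \n'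
--               '    :-----------------:|:--------:|:------:')
--     h = 2 ** (n - 1)
--     idx = [0, 1, 2, None, h - 2, h - 1, h, h + 1, h + 2, None, 2*h - 2, 2*h - 1]
--     bin_col = [' ...' if i is None else format(i, f'0{n}b') for i in idx]
--     uns_col = ['...' if i is None else str(i) for i in idx]
--     sgn_col = ['... ' if i is None else str(i if i < h else i - 2*h) for i in idx]
--     return [header] + [' | '.join(row) for row in zip(bin_col, uns_col, sgn_col)]
-- ===== Notes on version B (the rewrite author's own statement) =====
-- stated objective: alternative
-- what changed: B builds the three table columns (bit pattern, unsigned, signed-by-uniform-threshold-rule) as separate lists and zips/joins them into rows, instead of A's four row-wise loops with per-block signed formulas.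
-- intended difference: For widths below 3 (where A's index blocks overlap the sign threshold) A's hard-coded per-block signed column labels values >= 2^(n-1) in the low block as their unsigned value, printing the same bit pattern with two different signed values (e.g. '10 | 2 | 2' and '10 | 2 | -2' at n=2); B's uniform two's-complement threshold rule gives the consistent signed value everywhere. — e.g. on unsigned_sigined_int(2): A returns [" 2 bit bit pattern | `unsigned int2_t` | `signed int2_t` \n :-----------------:|:--------:|:------:", "00 | 0 | 0", "…, B returns [" 2 bit bit pattern | `unsigned int2_t` | `signed int2_t` \n :-----------------:|:--------:|:------:", "00 | 0 | 0", "…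
-- outside the precondition, e.g. on unsigned_sigined_int(0): A raises TypeError, B raises ValueError; on unsigned_sigined_int(-3): A raises ValueError, B raises ValueError
import Mathlib
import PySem

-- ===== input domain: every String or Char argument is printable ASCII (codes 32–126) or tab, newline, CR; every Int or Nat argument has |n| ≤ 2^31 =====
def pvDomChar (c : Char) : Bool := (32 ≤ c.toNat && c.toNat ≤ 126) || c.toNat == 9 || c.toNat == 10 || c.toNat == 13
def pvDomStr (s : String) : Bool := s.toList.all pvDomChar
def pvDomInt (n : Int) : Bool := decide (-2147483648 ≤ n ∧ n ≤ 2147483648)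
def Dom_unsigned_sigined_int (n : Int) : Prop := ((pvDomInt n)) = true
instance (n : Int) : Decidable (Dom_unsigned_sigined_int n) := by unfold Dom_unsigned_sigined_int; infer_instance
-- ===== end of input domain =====

-- B builds the three table columns separately (signed column by a uniform two's-complement
-- threshold rule) and zips them into rows, instead of A's four row-wise loops; objective: alternative.

-- Shared exact model of Python's f'{i:0{w}b}' (zero-fill pads after the '-' sign, which
-- counts toward the width; digits via PySem.Int.toBinChars = format(|i|,'b')):
def pvFmtBin (i : Int) (w : Int) : String :=
  if i < 0 then
    String.ofList ('-' :: (List.replicate ((w - 1).toNat - (PySem.Int.toBinChars (-i)).length) '0' ++ PySem.Int.toBinChars (-i)))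
  else
    String.ofList (List.replicate (w.toNat - (PySem.Int.toBinChars i).length) '0' ++ PySem.Int.toBinChars i)

-- ===== PORT A =====
def unsigned_sigined_int (n : Int) : List String :=
  let table : List String :=
    [" " ++ PySem.Int.toStr n ++ " bit bit pattern | `unsigned int" ++ PySem.Int.toStr n ++
      "_t` | `signed int" ++ PySem.Int.toStr n ++ "_t` \n    :-----------------:|:--------:|:------:"]
  -- table body : 0 ~ 3
  let table := (PySem.List.pyRange 0 3 1).foldl
    (fun t i => t ++ [pvFmtBin i n ++ " | " ++ PySem.Int.toStr i ++ " | " ++ PySem.Int.toStr i]) table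
  let table := table ++ [" ... | ... | ... "]
  -- rows around the change of the sign: positive
  let table := (PySem.List.pyRange ((2:Int) ^ (n - 1).toNat - 2) ((2:Int) ^ (n - 1).toNat - 1 + 1) 1).foldl
    (fun t i => t ++ [pvFmtBin i n ++ " | " ++ PySem.Int.toStr i ++ " | " ++ PySem.Int.toStr i]) table
  -- negative
  let table := (PySem.List.pyRange ((2:Int) ^ (n - 1).toNat) ((2:Int) ^ (n - 1).toNat + 2 + 1) 1).foldl
    (fun t i => t ++ [pvFmtBin i n ++ " | " ++ PySem.Int.toStr i ++ " | " ++ PySem.Int.toStr (i - (2:Int) ^ n.toNat)]) table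
  let table := table ++ [" ... | ... | ... "]
  -- rows close to the n bit limit
  let table := (PySem.List.pyRange ((2:Int) ^ n.toNat - 2) ((2:Int) ^ n.toNat - 1 + 1) 1).foldl
    (fun t i => t ++ [pvFmtBin i n ++ " | " ++ PySem.Int.toStr i ++ " | " ++ PySem.Int.toStr (i - (2:Int) ^ n.toNat)]) table
  table

-- ===== PORT B =====
def unsigned_sigined_int_alt (n : Int) : List String :=
  let header : String :=
    " " ++ PySem.Int.toStr n ++ " bit bit pattern | `unsigned int" ++ PySem.Int.toStr n ++
      "_t` | `signed int" ++ PySem.Int.toStr n ++ "_t` \n    :-----------------:|:--------:|:------:"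
  let h : Int := (2:Int) ^ (n - 1).toNat
  let idx : List (Option Int) :=
    [some 0, some 1, some 2, none, some (h - 2), some (h - 1), some h,
     some (h + 1), some (h + 2), none, some (2 * h - 2), some (2 * h - 1)]
  let binCol := idx.map (fun o => match o with | none => " ..." | some i => pvFmtBin i n)
  let unsCol := idx.map (fun o => match o with | none => "..." | some i => PySem.Int.toStr i)
  let sgnCol := idx.map (fun o => match o with
    | none => "... "
    | some i => PySem.Int.toStr (if i < h then i else i - 2 * h))
  [header] ++ (binCol.zip (unsCol.zip sgnCol)).map
    (fun r => PySem.Str.join " | " [r.1, r.2.1, r.2.2])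

-- ===== PRECONDITION & SPEC =====
-- Pre_ excludes n ≤ 0, where Python A raises (TypeError: 2**(n-1) is a float for n ≤ 0,
-- so range gets a float bound; or ValueError from the non-positive format width) — A returns on exactly n ≥ 1.
def Pre_unsigned_sigined_int (n : Int) : Prop := 1 ≤ n
instance (n : Int) : Decidable (Pre_unsigned_sigined_int n) := by unfold Pre_unsigned_sigined_int; infer_instance
def pvWitness_unsigned_sigined_int : Int := 4

-- For widths below 3 (where A's index blocks overlap the sign threshold) A's hard-coded per-block
-- signed column labels values ≥ 2^(n-1) in the low block as their unsigned value, printing the same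
-- bit pattern with two different signed values (e.g. '10 | 2 | 2' and '10 | 2 | -2' at n=2);
-- B's uniform two's-complement threshold rule gives the consistent signed value everywhere.
def D_unsigned_sigined_int (n : Int) : Prop := n = 1 ∨ n = 2
instance (n : Int) : Decidable (D_unsigned_sigined_int n) := by unfold D_unsigned_sigined_int; infer_instance

def Spec_unsigned_sigined_int (n : Int) (out : List String) : Prop :=
  ¬ D_unsigned_sigined_int n → out = unsigned_sigined_int_alt n
instance (n : Int) (out : List String) : Decidable (Spec_unsigned_sigined_int n out) := by
  unfold Spec_unsigned_sigined_int; infer_instance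

def pvDiffWitness_unsigned_sigined_int : Int := 2
def pvDiffWitnessOut_unsigned_sigined_int : (List String) × (List String) :=
  ([" 2 bit bit pattern | `unsigned int2_t` | `signed int2_t` \n    :-----------------:|:--------:|:------:",
    "00 | 0 | 0", "01 | 1 | 1", "10 | 2 | 2", " ... | ... | ... ",
    "00 | 0 | 0", "01 | 1 | 1", "10 | 2 | -2", "11 | 3 | -1", "100 | 4 | 0",
    " ... | ... | ... ", "10 | 2 | -2", "11 | 3 | -1"],
   [" 2 bit bit pattern | `unsigned int2_t` | `signed int2_t` \n    :-----------------:|:--------:|:------:",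
    "00 | 0 | 0", "01 | 1 | 1", "10 | 2 | -2", " ... | ... | ... ",
    "00 | 0 | 0", "01 | 1 | 1", "10 | 2 | -2", "11 | 3 | -1", "100 | 4 | 0",
    " ... | ... | ... ", "10 | 2 | -2", "11 | 3 | -1"])

-- ===== CLAIM =====
def Claim_unchanged_unsigned_sigined_int : Prop := ∀ (n : Int), Dom_unsigned_sigined_int n → Pre_unsigned_sigined_int n → Spec_unsigned_sigined_int n (unsigned_sigined_int n)
def Claim_changed_unsigned_sigined_int : Prop := Dom_unsigned_sigined_int (pvDiffWitness_unsigned_sigined_int) ∧ Pre_unsigned_sigined_int (pvDiffWitness_unsigned_sigined_int) ∧ D_unsigned_sigined_int (pvDiffWitness_unsigned_sigined_int) ∧ unsigned_sigined_int (pvDiffWitness_unsigned_sigined_int) = pvDiffWitnessOut_unsigned_sigined_int.1 ∧ unsigned_sigined_int_alt (pvDiffWitness_unsigned_sigined_int) = pvDiffWitnessOut_unsigned_sigined_int.2 ∧ pvDiffWitnessOut_unsigned_sigined_int.1 ≠ pvDiffWitnessOut_unsigned_sigined_int.2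
def Claim_exact_unsigned_sigined_int : Prop := ∀ (n : Int), Dom_unsigned_sigined_int n → Pre_unsigned_sigined_int n → D_unsigned_sigined_int n → unsigned_sigined_int n ≠ unsigned_sigined_int_alt n

-- ===== LEMMAS AND PROOFS =====
theorem pv_join3 (a b c : String) : PySem.Str.join " | " [a, b, c] = a ++ " | " ++ b ++ " | " ++ c := by
  apply String.toList_injective
  simp [PySem.Str.join, PySem.Chars.join, List.intercalate]

theorem pv_pr2 (a b : Int) (hb : b = a + 2) : PySem.List.pyRange a b 1 = [a, a + 1] := by
  subst hb
  rw [PySem.List.pyRange_one_cons (by omega), PySem.List.pyRange_one_cons (by omega),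
      PySem.List.pyRange_one_eq_nil (by omega)]

theorem pv_pr3 (a b : Int) (hb : b = a + 3) : PySem.List.pyRange a b 1 = [a, a + 1, a + 2] := by
  subst hb
  rw [PySem.List.pyRange_one_cons (by omega), PySem.List.pyRange_one_cons (by omega),
      PySem.List.pyRange_one_cons (by omega), PySem.List.pyRange_one_eq_nil (by omega)]
  simp only [List.cons.injEq, and_true]
  exact ⟨trivial, trivial, by ring⟩

-- ===== VERDICT =====
theorem unsigned_sigined_int_spec : Claim_unchanged_unsigned_sigined_int := by
  intro n _ hn hD
  simp only [unsigned_sigined_int, unsigned_sigined_int_alt]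
  have hn3 : 3 ≤ n := by
    unfold Pre_unsigned_sigined_int at hn
    unfold D_unsigned_sigined_int at hD
    omega
  have hfull : (2:Int) ^ n.toNat = 2 * (2:Int) ^ (n - 1).toNat := by
    have h : n.toNat = (n - 1).toNat + 1 := by omega
    rw [h, pow_succ]; ring
  rw [hfull]
  set h := (2:Int) ^ (n - 1).toNat with hh
  have h4 : 4 ≤ h := by
    have : (2:Int) ^ 2 ≤ (2:Int) ^ (n - 1).toNat :=
      pow_le_pow_right₀ (by norm_num) (by omega)
    simpa [hh] using this
  rw [pv_pr3 0 3 (by norm_num),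
      pv_pr2 (h - 2) (h - 1 + 1) (by ring),
      pv_pr3 h (h + 2 + 1) (by ring),
      pv_pr2 (2 * h - 2) (2 * h - 1 + 1) (by ring)]
  simp [List.foldl, pv_join3, sub_eq_add_neg,
        show (0:Int) < h by omega, show (1:Int) < h by omega, show (2:Int) < h by omega,
        show ¬(h + 1 < h) by omega, show ¬(h + 2 < h) by omega,
        show ¬(2 * h < h + 2) by omega, show ¬(2 * h < h + 1) by omega]
  ring_nf
  exact ⟨trivial, trivial⟩

theorem unsigned_sigined_int_changed : Claim_changed_unsigned_sigined_int := by
  unfold Claim_changed_unsigned_sigined_int; decide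

theorem unsigned_sigined_int_tight : Claim_exact_unsigned_sigined_int := by
  intro n _ _ hD
  unfold D_unsigned_sigined_int at hD
  rcases hD with h1 | h2
  · subst h1; decide
  · subst h2; decide
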